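-- pv_equiv track=rewrite | github.com/Wangzhijian314/Linear_Algebra_TAS | latex2json.py | split_braces
-- ===== SOURCE A (Python) =====
-- def split_braces(s):
--     """
--     输入形如 {内容} {内容} {内容} {内容} {内容} 的字符串
--     返回内容列表，能正确匹配嵌套的大括号。
--     """
--     results = []
--     stack = []
--     current = []
--     for c in s:
--         if c == '{':
--             if stack:
--                 current.append(c)
--             stack.append(c)
--         elif c == '}':
--             stack.pop()
--             if stack:
--                 current.append(c)
--             else:
--                 # 大括号闭合，保存结果
--                 results.append(''.join(current))
--                 current = []
--         else:
--             if stack: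
--                 current.append(c)
--     return results
-- ===== SOURCE B (Python) =====
-- def split_braces(s):
--     results = []
--     depth = 0
--     start = 0
--     for i, c in enumerate(s):
--         if c == '{':
--             if depth == 0:
--                 start = i
--             depth += 1
--         elif c == '}':
--             depth -= 1
--             if depth == 0:
--                 results.append(s[start + 1:i])
--     return results
-- ===== Notes on version B (the rewrite author's own statement) =====
-- stated objective: simpler
-- what changed: B replaces A's character buffer plus explicit stack with a single integer nesting depth and the index where the current top-level group opened, emitting each result as one slice s[start+1:i] of the original string instead of joining an accumulated character list.
-- outside the precondition, e.g. on split_braces('}'): A raises IndexError, B returns []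
import Mathlib
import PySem

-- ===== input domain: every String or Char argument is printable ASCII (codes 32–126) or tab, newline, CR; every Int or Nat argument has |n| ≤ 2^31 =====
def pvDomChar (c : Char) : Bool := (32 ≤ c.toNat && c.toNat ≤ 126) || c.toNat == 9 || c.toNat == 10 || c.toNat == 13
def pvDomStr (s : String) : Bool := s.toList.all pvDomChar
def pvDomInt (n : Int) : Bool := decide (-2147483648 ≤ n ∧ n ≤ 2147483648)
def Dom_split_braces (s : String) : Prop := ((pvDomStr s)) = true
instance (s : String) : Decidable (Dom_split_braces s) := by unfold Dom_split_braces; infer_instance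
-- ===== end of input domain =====

-- B drops the character buffer and stack for an integer depth and a start index, returning slices of the
-- original string; same O(n) cost, simpler state. Proved equal to A on all inputs where A does not raise.

-- ===== PORT A =====
-- state: (results, stack, current); on '}' with empty stack Python pops an empty list and raises
-- IndexError — excluded by Pre_ below (there dropLast [] = [] is a placeholder, nothing is claimed).
def splitA_go : List Char → List String → List Char → List Char → List String
  | [], res, _stack, _cur => res
  | c :: cs, res, stack, cur =>
    if c = '{' then
      splitA_go cs res (stack ++ ['{']) (if stack.isEmpty then cur else cur ++ [c])
    else if c = '}' then
      let stack' := stack.dropLast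
      if stack'.isEmpty then splitA_go cs (res ++ [String.ofList cur]) stack' []
      else splitA_go cs res stack' (cur ++ [c])
    else
      splitA_go cs res stack (if stack.isEmpty then cur else cur ++ [c])

def split_braces (s : String) : List String := splitA_go s.toList [] [] []

-- ===== PORT B =====
-- state: (i, depth, start, results); appends s[start+1:i] when depth returns to 0
def splitB_go (full : List Char) : List Char → Nat → Int → Nat → List String → List String
  | [], _i, _depth, _start, res => res
  | c :: cs, i, depth, start, res =>
    if c = '{' then
      splitB_go full cs (i + 1) (depth + 1) (if depth = 0 then i else start) res
    else if c = '}' then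
      if depth - 1 = 0 then
        splitB_go full cs (i + 1) (depth - 1) start
          (res ++ [String.ofList (PySem.List.slice full (some ((start : Int) + 1)) (some (i : Int)))])
      else
        splitB_go full cs (i + 1) (depth - 1) start res
    else
      splitB_go full cs (i + 1) depth start res

def split_braces_alt (s : String) : List String := splitB_go s.toList s.toList 0 0 0 []

-- ===== PRECONDITION & SPEC =====
-- Pre_ excludes exactly the strings on which A raises IndexError (a '}' arriving with no open '{':
-- some prefix has more '}' than '{'); A returns on every other string.
def Pre_split_braces (s : String) : Prop :=
  ∀ n ≤ s.toList.length, (s.toList.take n).count '}' ≤ (s.toList.take n).count '{'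
instance (s : String) : Decidable (Pre_split_braces s) := by unfold Pre_split_braces; infer_instance

def pvWitness_split_braces : String := "{a}{b{c}}"

def Spec_split_braces (s : String) (out : List String) : Prop := out = split_braces_alt s
instance (s : String) (out : List String) : Decidable (Spec_split_braces s out) := by unfold Spec_split_braces; infer_instance

-- ===== CLAIM (what is proved, stated in full; the proofs are below) =====
def Claim_equal_split_braces : Prop := ∀ (s : String), Dom_split_braces s → Pre_split_braces s → Spec_split_braces s (split_braces s)

-- ===== LEMMAS AND PROOFS =====

-- extending the current window by the character at index i
lemma take_snoc (l : List Char) (a i : Nat) (ha : a ≤ i) (hi : i < l.length) :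
    (l.drop a).take (i - a) ++ [l[i]] = (l.drop a).take (i + 1 - a) := by
  have h1 : i + 1 - a = (i - a) + 1 := by omega
  have h2 : (l.drop a)[i - a]? = some l[i] := by
    rw [List.getElem?_drop]
    have : a + (i - a) = i := by omega
    rw [this, List.getElem?_eq_getElem hi]
  rw [h1, List.take_add_one, h2]
  rfl

lemma go_eq (full : List Char) :
    ∀ (cs : List Char) (i : Nat) (stack cur : List Char) (start : Nat) (res : List String),
      i + cs.length = full.length →
      full.drop i = cs →
      (∀ n ≤ cs.length, (cs.take n).count '}' ≤ stack.length + (cs.take n).count '{') →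
      (stack = [] → cur = []) →
      (stack ≠ [] → start < i ∧ cur = (full.drop (start + 1)).take (i - (start + 1))) →
      splitA_go cs res stack cur = splitB_go full cs i (stack.length : Int) start res := by
  intro cs
  induction cs with
  | nil => intro i stack cur start res _ _ _ _ _; simp [splitA_go, splitB_go]
  | cons c cs ih =>
    intro i stack cur start res hlen hdrop hcnt hnil hcur
    have hil : i < full.length := by simp at hlen; omega
    have hci : full[i] = c := by
      have : (full.drop i)[0]'(by simp [hdrop]) = c := by simp [hdrop]
      simpa [List.getElem_drop] using this
    have hdrop' : full.drop (i + 1) = cs := by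
      have : full.drop (i + 1) = (full.drop i).drop 1 := by
        rw [List.drop_drop]
      simp [this, hdrop]
    have hlen' : (i + 1) + cs.length = full.length := by simp at hlen ⊢; omega
    by_cases hbrace : c = '{'
    · subst hbrace
      have hcnt' : ∀ n ≤ cs.length, (cs.take n).count '}' ≤ stack.length + 1 + (cs.take n).count '{' := by
        intro n hn
        have := hcnt (n + 1) (by simp; omega)
        simp at this ⊢
        omega
      by_cases hs : stack = []
      · subst hs
        have := ih (i + 1) ['{'] cur i res hlen' hdrop'
          (by simpa using hcnt') (by simp [hnil rfl]) (by
            intro _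
            exact ⟨by omega, by simp [hnil rfl]⟩)
        simpa [splitA_go, splitB_go] using this
      · have hd0 : ¬ ((stack.length : Int) = 0) := by
          simp [List.length_eq_zero_iff]; exact hs
        obtain ⟨hlt, hceq⟩ := hcur hs
        have := ih (i + 1) (stack ++ ['{']) (cur ++ ['{']) start res hlen' hdrop'
          (by simpa using hcnt') (by simp) (by
            intro _
            refine ⟨by omega, ?_⟩
            rw [hceq, ← hci]
            exact take_snoc full (start + 1) i (by omega) hil)
        simp only [splitA_go, splitB_go, List.isEmpty_eq_false_iff.mpr hs, if_false,
          if_neg hd0, if_pos rfl, Bool.false_eq_true]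
        simpa using this
    · by_cases hclose : c = '}'
      · subst hclose
        have hstack : stack ≠ [] := by
          have := hcnt 1 (by simp)
          simp at this
          intro h; subst h; simp at this
        have hslen : 1 ≤ stack.length := by
          cases stack with
          | nil => exact absurd rfl hstack
          | cons _ _ => simp
        obtain ⟨hlt, hceq⟩ := hcur hstack
        have hdl : stack.dropLast.length = stack.length - 1 := by simp
        have hcnt' : ∀ n ≤ cs.length, (cs.take n).count '}' ≤ stack.dropLast.length + (cs.take n).count '{' := by
          intro n hn
          have := hcnt (n + 1) (by simp; omega)
          simp [hdl] at this ⊢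
          omega
        by_cases hone : stack.length = 1
        · have hsd : stack.dropLast = [] := List.length_eq_zero_iff.mp (by omega)
          have hdint : ((stack.length : Int) - 1 = 0) := by rw [hone]; ring
          have hsliceq : String.ofList cur =
              String.ofList (PySem.List.slice full (some ((start : Int) + 1)) (some (i : Int))) := by
            have hcast : ((start : Int) + 1) = ((start + 1 : Nat) : Int) := by push_cast; ring
            rw [hcast, PySem.List.slice_natCast, hceq]
          have := ih (i + 1) [] [] start
            (res ++ [String.ofList (PySem.List.slice full (some ((start : Int) + 1)) (some (i : Int)))])
            hlen' hdrop' (by simpa [hsd] using hcnt') (fun _ => rfl) (by simp)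
          simp only [splitA_go, splitB_go, hsd, List.isEmpty_nil, if_pos hdint,
            if_neg (by decide : ¬('}' = '{'))]
          rw [hsliceq]
          simpa [hone] using this
        · have h2 : 2 ≤ stack.length := by omega
          have hnempty : stack.dropLast.isEmpty = false := by
            simp [List.isEmpty_eq_false_iff, ← List.length_pos_iff]; omega
          have hdint : ¬ ((stack.length : Int) - 1 = 0) := by
            intro h; have : (stack.length : Int) = 1 := by omega
            exact hone (by exact_mod_cast this)
          have := ih (i + 1) stack.dropLast (cur ++ ['}']) start res hlen' hdrop'
            hcnt' (by intro h; rw [h] at hdl; simp at hdl; omega) (by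
              intro _
              refine ⟨by omega, ?_⟩
              rw [hceq, ← hci]
              exact take_snoc full (start + 1) i (by omega) hil)
          have hc : ((stack.dropLast.length : Nat) : Int) = (stack.length : Int) - 1 := by
            rw [hdl]; omega
          rw [hc] at this
          simp only [splitA_go, splitB_go, hnempty, if_neg hdint,
            if_neg (by decide : ¬('}' = '{')), Bool.false_eq_true, if_false]
          exact this
      · -- ordinary character
        have hcnt' : ∀ n ≤ cs.length, (cs.take n).count '}' ≤ stack.length + (cs.take n).count '{' := by
          intro n hn
          have := hcnt (n + 1) (by simp; omega)
          simpa [List.count_cons, hbrace, hclose] using this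
        by_cases hs : stack = []
        · subst hs
          have := ih (i + 1) [] cur start res hlen' hdrop' (by simpa using hcnt') hnil (by simp)
          simpa [splitA_go, splitB_go, hbrace, hclose] using this
        · obtain ⟨hlt, hceq⟩ := hcur hs
          have := ih (i + 1) stack (cur ++ [c]) start res hlen' hdrop' hcnt'
            (fun h => absurd h hs) (by
              intro _
              refine ⟨by omega, ?_⟩
              rw [hceq, ← hci]
              exact take_snoc full (start + 1) i (by omega) hil)
          simpa [splitA_go, splitB_go, hbrace, hclose, List.isEmpty_eq_false_iff.mpr hs] using this

-- ===== VERDICT (by name: the statement is the Claim_ definition above) =====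
theorem split_braces_spec : Claim_equal_split_braces := by
  intro s _hdom hpre
  unfold Spec_split_braces split_braces split_braces_alt
  have := go_eq s.toList s.toList 0 [] [] 0 []
    (by simp) (by simp) (by simpa using hpre) (fun _ => rfl) (by simp)
  simpa using this
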